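-- pv_equiv track=rewrite | github.com/MagMc007/A2SV_Solved_Questions | LeetCode/P2/create_a_sorted_arr_t_instructions.py | createSortedArray
-- ===== SOURCE A (Python) =====
-- from bisect import bisect_right, bisect_left
--
-- def createSortedArray(instructions: list[int]) -> int:
--     cost = 0
--
--     sorted_arr = []
--
--     for i in range(len(instructions)):
--         idx1 = bisect_right(sorted_arr, instructions[i])
--         idx2 = bisect_left(sorted_arr, instructions[i])
--
--         less = idx2
--         greater = i - idx1
--
--         cost += min(less, greater)
--         sorted_arr.insert(idx1, instructions[i])
--
--     return cost % (7 + 10 ** 9)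
-- ===== SOURCE B (Python) =====
-- def createSortedArray(instructions: list[int]) -> int:
--     cost = 0
--     prefix = []
--     for x in instructions:
--         less = 0
--         greater = 0
--         for y in prefix:
--             if y < x:
--                 less += 1
--             elif y > x:
--                 greater += 1
--         cost += min(less, greater)
--         prefix.append(x)
--     return cost % (10 ** 9 + 7)
-- ===== Notes on version B (the rewrite author's own statement) =====
-- stated objective: alternative
-- what changed: B drops the maintained sorted array and bisect entirely: it counts smaller/larger previous elements by a direct scan of the plain prefix, no binary search and no positional insertion.
import Mathlib
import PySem

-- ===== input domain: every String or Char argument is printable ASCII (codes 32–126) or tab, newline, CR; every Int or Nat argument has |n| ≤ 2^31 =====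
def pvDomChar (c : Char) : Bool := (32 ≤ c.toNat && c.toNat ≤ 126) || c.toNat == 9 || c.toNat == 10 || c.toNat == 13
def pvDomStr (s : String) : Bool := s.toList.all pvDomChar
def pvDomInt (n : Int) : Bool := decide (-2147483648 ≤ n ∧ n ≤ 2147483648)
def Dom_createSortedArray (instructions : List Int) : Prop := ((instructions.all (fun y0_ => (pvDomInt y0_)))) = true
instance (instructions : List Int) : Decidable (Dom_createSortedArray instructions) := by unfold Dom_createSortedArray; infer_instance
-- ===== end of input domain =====

-- B drops the maintained sorted array and bisect: it counts smaller/larger previous elements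
-- by a direct scan of the plain prefix (objective: simpler; same asymptotic cost).

-- ===== PORT A =====
-- bisect_right / bisect_left are library calls; sorted_arr is (and stays) sorted, so on it
-- bisect_right l x = number of elements ≤ x and bisect_left l x = number of elements < x:
-- these counts are exact for the sorted lists A ever passes.
def pvBisectRight (l : List Int) (x : Int) : Nat := l.countP (fun y => y ≤ x)
def pvBisectLeft (l : List Int) (x : Int) : Nat := l.countP (fun y => y < x)

-- loop state: (cost, sorted_arr, i)
def pvStepA (acc : Int × List Int × Int) (x : Int) : Int × List Int × Int :=
  let idx1 := pvBisectRight acc.2.1 x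
  let idx2 := pvBisectLeft acc.2.1 x
  let less : Int := (idx2 : Int)
  let greater : Int := acc.2.2 - (idx1 : Int)
  (acc.1 + min less greater, acc.2.1.insertIdx idx1 x, acc.2.2 + 1)

def createSortedArray (instructions : List Int) : Int :=
  (instructions.foldl pvStepA (0, [], 0)).1 % (7 + 10 ^ 9)

-- ===== PORT B =====
-- inner loop: scan the prefix counting (less, greater)
def pvCountLG (prefix_ : List Int) (x : Int) : Int × Int :=
  prefix_.foldl (fun lg y => if y < x then (lg.1 + 1, lg.2) else if y > x then (lg.1, lg.2 + 1) else lg)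
    ((0 : Int), (0 : Int))

-- loop state: (cost, prefix)
def pvStepB (acc : Int × List Int) (x : Int) : Int × List Int :=
  let lg := pvCountLG acc.2 x
  (acc.1 + min lg.1 lg.2, acc.2 ++ [x])

def createSortedArray_alt (instructions : List Int) : Int :=
  (instructions.foldl pvStepB (0, [])).1 % (10 ^ 9 + 7)

-- ===== PRECONDITION & SPEC =====
def Spec_createSortedArray (instructions : List Int) (out : Int) : Prop := out = createSortedArray_alt instructions
instance (instructions : List Int) (out : Int) : Decidable (Spec_createSortedArray instructions out) := by unfold Spec_createSortedArray; infer_instance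

-- ===== CLAIM (what is proved, stated in full; the proofs are below) =====
def Claim_equal_createSortedArray : Prop := ∀ (instructions : List Int), Dom_createSortedArray instructions → Spec_createSortedArray instructions (createSortedArray instructions)

-- ===== LEMMAS AND PROOFS =====

lemma pvCountLG_eq (prefix_ : List Int) (x : Int) :
    pvCountLG prefix_ x =
      ((prefix_.countP (fun y => y < x) : Int), (prefix_.countP (fun y => x < y) : Int)) := by
  unfold pvCountLG
  suffices h : ∀ (a b : Int),
      prefix_.foldl (fun lg y => if y < x then (lg.1 + 1, lg.2) else if y > x then (lg.1, lg.2 + 1) else lg) (a, b)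
        = (a + (prefix_.countP (fun y => y < x) : Int), b + (prefix_.countP (fun y => x < y) : Int)) by
    simpa using h 0 0
  induction prefix_ with
  | nil => simp
  | cons y t ih =>
    intro a b
    by_cases h1 : y < x
    · simp [h1, not_lt.mpr (le_of_lt h1), ih]; ring_nf
    · by_cases h2 : x < y
      · simp [h1, h2, GT.gt, ih]; ring_nf
      · simp [h1, h2, GT.gt, ih]

lemma pv_fold_eq (rest : List Int) :
    ∀ (cost : Int) (arr pre : List Int), arr.Perm pre →
    (rest.foldl pvStepA (cost, arr, (pre.length : Int))).1 = (rest.foldl pvStepB (cost, pre)).1 := by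
  induction rest with
  | nil => intro cost arr pre _; simp
  | cons x t ih =>
    intro cost arr pre hperm
    have hcnt : ∀ p : Int → Bool, arr.countP p = pre.countP p := fun p => hperm.countP_eq p
    have hlen : arr.length = pre.length := hperm.length_eq
    have hgr : (pre.length : Int) - (pvBisectRight arr x : Int) = (pre.countP (fun y => x < y) : Int) := by
      have hnot : pre.countP (fun a => decide (¬ (decide (a ≤ x) = true))) = pre.countP (fun y => decide (x < y)) :=
        List.countP_congr (fun a _ => by simp)
      have hsplit := List.length_eq_countP_add_countP (p := fun y => decide (y ≤ x)) (l := pre)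
      rw [hnot] at hsplit
      unfold pvBisectRight
      rw [hcnt]
      omega
    have hstepA : pvStepA (cost, arr, (pre.length : Int)) x
        = (cost + min ((pre.countP (fun y => y < x) : Int)) ((pre.countP (fun y => x < y) : Int)),
           arr.insertIdx (pvBisectRight arr x) x, (pre.length : Int) + 1) := by
      unfold pvStepA pvBisectLeft
      simp only [hcnt, hgr]
    have hstepB : pvStepB (cost, pre) x
        = (cost + min ((pre.countP (fun y => y < x) : Int)) ((pre.countP (fun y => x < y) : Int)),
           pre ++ [x]) := by
      unfold pvStepB
      rw [pvCountLG_eq]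
    have hperm' : (arr.insertIdx (pvBisectRight arr x) x).Perm (pre ++ [x]) := by
      have h1 : (arr.insertIdx (pvBisectRight arr x) x).Perm (x :: arr) := by
        apply List.perm_insertIdx
        unfold pvBisectRight
        exact List.countP_le_length
      exact h1.trans ((hperm.cons x).trans (List.perm_append_singleton x pre).symm)
    have hlen' : ((pre ++ [x]).length : Int) = (pre.length : Int) + 1 := by
      simp
    calc (List.foldl pvStepA (cost, arr, (pre.length : Int)) (x :: t)).1
        = (List.foldl pvStepA (pvStepA (cost, arr, (pre.length : Int)) x) t).1 := by simp [List.foldl]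
      _ = (List.foldl pvStepB (pvStepB (cost, pre) x) t).1 := by
          rw [hstepA, hstepB]
          have := ih (cost + min ((pre.countP (fun y => y < x) : Int)) ((pre.countP (fun y => x < y) : Int)))
            (arr.insertIdx (pvBisectRight arr x) x) (pre ++ [x]) hperm'
          rw [← hlen'] at *
          exact this
      _ = (List.foldl pvStepB (cost, pre) (x :: t)).1 := by simp [List.foldl]

-- ===== VERDICT (by name: the statement is the Claim_ definition above) =====
theorem createSortedArray_spec : Claim_equal_createSortedArray := by
  intro instructions _
  unfold Spec_createSortedArray createSortedArray createSortedArray_alt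
  have h := pv_fold_eq instructions 0 [] [] (List.Perm.refl [])
  simp only [List.length_nil, Nat.cast_zero] at h
  rw [h]
  norm_num
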